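-- pv_equiv track=rewrite | github.com/FredericoSRamos/QRCode-Generator | qrcode.py | evaluate_third_penalty
-- ===== SOURCE A (Python) =====
-- def add_quiet_zone(matrix):
--     size = len(matrix)
--
--     final_matrix = [[0] * (size + 8) for _ in range(size + 8)]
--
--     for i in range(size):
--         for j in range(size):
--             final_matrix[i + 4][j + 4] = matrix[i][j]
--
--     return final_matrix
--
-- def evaluate_third_penalty(matrix):
--     penalty = 0
--
--     bad_patterns = ['10111010000', '00001011101']
--     full_matrix = add_quiet_zone(matrix)
--     size = len(full_matrix)
--
--     for i in range(size):
--         for j in range(size - 10):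
--             horizontal_segment = ''.join(map(str, full_matrix[i][j:j + 11]))
--             if horizontal_segment in bad_patterns:
--                 penalty += 40
--
--             vertical_segment = ''.join(str(full_matrix[j + k][i]) for k in range(11))
--             if vertical_segment in bad_patterns:
--                 penalty += 40
--
--     return penalty
-- ===== SOURCE B (Python) =====
-- BAD_PATTERNS = ('10111010000', '00001011101')
--
-- def _cell_char(value):
--     # the matrix is a bit matrix; map each cell to one character
--     if value == 1:
--         return '1'
--     if value == 0:
--         return '0'
--     return 'x'
--
-- def _count_overlapping(line, pattern):
--     count = 0
--     start = line.find(pattern)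
--     while start != -1:
--         count += 1
--         start = line.find(pattern, start + 1)
--     return count
--
-- def evaluate_third_penalty(matrix):
--     size = len(matrix)
--     pad = '0' * 4
--     zero_line = '0' * (size + 8)
--     rows = [zero_line] * 4 + \
--         [pad + ''.join(_cell_char(value) for value in row[:size]) + pad for row in matrix] + \
--         [zero_line] * 4
--     columns = [''.join(row[j] for row in rows) for j in range(size + 8)]
--     total = 0
--     for line in rows + columns:
--         for pattern in BAD_PATTERNS:
--             total += _count_overlapping(line, pattern)
--     return 40 * total
-- ===== Notes on version B (the rewrite author's own statement) =====
-- stated objective: alternative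
-- what changed: B builds each padded scan line (rows, plus columns via transposition) once as a character string and counts overlapping occurrences of the two bad patterns with a find-and-resume loop, instead of A's per-(i,j) slicing, str-joining and membership-testing of every 11-wide window.
-- outside the precondition, e.g. on evaluate_third_penalty([[1], [0, 1]]): A raises IndexError, B raises IndexError
import Mathlib
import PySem

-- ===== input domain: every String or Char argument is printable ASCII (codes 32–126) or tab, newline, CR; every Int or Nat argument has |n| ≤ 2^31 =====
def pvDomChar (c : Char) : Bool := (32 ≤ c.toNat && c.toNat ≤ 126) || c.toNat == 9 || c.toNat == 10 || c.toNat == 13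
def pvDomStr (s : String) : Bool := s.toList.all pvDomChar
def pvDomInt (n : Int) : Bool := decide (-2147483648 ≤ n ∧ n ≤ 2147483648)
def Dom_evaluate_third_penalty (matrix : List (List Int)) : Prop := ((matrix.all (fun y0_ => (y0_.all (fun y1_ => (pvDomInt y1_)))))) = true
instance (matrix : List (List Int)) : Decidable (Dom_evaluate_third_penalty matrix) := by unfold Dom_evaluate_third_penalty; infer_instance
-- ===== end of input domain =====

-- B replaces A's per-window slicing/joining by building each padded scan line (rows and
-- transposed columns) once as a character line and counting overlapping pattern hits with a
-- find-loop; objective: alternative (same asymptotic cost, different traversal).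

-- ===== PORT A =====
def add_quiet_zone (matrix : List (List Int)) : List (List Int) :=
  let size := matrix.length
  (List.range size).foldl (fun fm i =>
    (List.range size).foldl (fun fm j =>
      fm.set (i + 4) ((fm.getD (i + 4) []).set (j + 4) ((matrix.getD i []).getD j 0))) fm)
    (List.replicate (size + 8) (List.replicate (size + 8) (0 : Int)))

def evaluate_third_penalty (matrix : List (List Int)) : Int :=
  let bad_patterns : List String := ["10111010000", "00001011101"]
  let full_matrix := add_quiet_zone matrix
  let size := full_matrix.length
  (List.range size).foldl (fun pen i =>
    (List.range (size - 10)).foldl (fun pen (j : Nat) =>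
      let horizontal := PySem.Str.join ""
        ((PySem.List.slice (full_matrix.getD i []) (some (j : Int)) (some ((j : Int) + 11))).map PySem.Int.toStr)
      let pen := if bad_patterns.contains horizontal then pen + 40 else pen
      let vertical := PySem.Str.join ""
        ((List.range 11).map fun k => PySem.Int.toStr ((full_matrix.getD (j + k) []).getD i 0))
      if bad_patterns.contains vertical then pen + 40 else pen) pen) 0

-- ===== PORT B =====
def cellChar (value : Int) : Char := if value = 1 then '1' else if value = 0 then '0' else 'x'

-- termination fact for the find-loop: a hit of `find(pat, s)` lies at or beyond s (and s is in range)
lemma findFrom_ne_bounds (line pat : List Char) (s : Nat)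
    (h : PySem.Chars.findFrom line pat (s : Int) ≠ -1) :
    s ≤ line.length ∧ s ≤ (PySem.Chars.findFrom line pat (s : Int)).toNat := by
  by_cases hs : s ≤ line.length
  · have := PySem.Chars.findFrom_natCast_spec line pat s hs h
    exact ⟨hs, by omega⟩
  · exfalso; apply h
    simp only [PySem.Chars.findFrom]
    rw [if_pos]
    omega

def count_overlapping_from (line pat : List Char) (s : Nat) : Nat :=
  let r := PySem.Chars.findFrom line pat (s : Int)
  if h : r = -1 then 0
  else 1 + count_overlapping_from line pat (r.toNat + 1)
termination_by line.length + 1 - s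
decreasing_by
  have := findFrom_ne_bounds line pat s h
  omega

def evaluate_third_penalty_alt (matrix : List (List Int)) : Int :=
  let size := matrix.length
  let pad := List.replicate 4 '0'
  let zero_line := List.replicate (size + 8) '0'
  let rows := List.replicate 4 zero_line ++
    matrix.map (fun row => pad ++ (row.take size).map cellChar ++ pad) ++
    List.replicate 4 zero_line
  let columns := (List.range (size + 8)).map (fun j => rows.map (fun r => r.getD j '0'))
  40 * ((rows ++ columns).foldl (fun total line =>
    ["10111010000".toList, "00001011101".toList].foldl
      (fun total pat => total + (count_overlapping_from line pat 0 : Int)) total) 0)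

-- ===== PRECONDITION & SPEC =====
-- Pre_ excludes ragged matrices with a row shorter than the matrix height, on which A raises
-- IndexError while filling the quiet zone (and B raises IndexError too, while transposing).
def Pre_evaluate_third_penalty (matrix : List (List Int)) : Prop :=
  ∀ row ∈ matrix, matrix.length ≤ row.length
instance (matrix : List (List Int)) : Decidable (Pre_evaluate_third_penalty matrix) := by
  unfold Pre_evaluate_third_penalty; infer_instance
def pvWitness_evaluate_third_penalty : List (List Int) := [[1, 0], [0, 1]]

def Spec_evaluate_third_penalty (matrix : List (List Int)) (out : Int) : Prop := out = evaluate_third_penalty_alt matrix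
instance (matrix : List (List Int)) (out : Int) : Decidable (Spec_evaluate_third_penalty matrix out) := by unfold Spec_evaluate_third_penalty; infer_instance

-- ===== CLAIM (what is proved, stated in full; the proofs are below) =====
def Claim_equal_evaluate_third_penalty : Prop := ∀ (matrix : List (List Int)), Dom_evaluate_third_penalty matrix → Pre_evaluate_third_penalty matrix → Spec_evaluate_third_penalty matrix (evaluate_third_penalty matrix)

-- ===== LEMMAS AND PROOFS =====

def padRow (n : Nat) (row : List Int) : List Int :=
  List.replicate 4 0 ++ (List.range n).map (fun j => row.getD j 0) ++ List.replicate 4 0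

def qz (matrix : List (List Int)) : List (List Int) :=
  List.replicate 4 (List.replicate (matrix.length + 8) 0) ++
    matrix.map (padRow matrix.length) ++ List.replicate 4 (List.replicate (matrix.length + 8) 0)

lemma set_append_len (l1 l2 : List Int) (i : Nat) (a : Int) :
    (l1 ++ l2).set (l1.length + i) a = l1 ++ l2.set i a := by simp

lemma setL_append_len (l1 l2 : List (List Int)) (i : Nat) (a : List Int) :
    (l1 ++ l2).set (l1.length + i) a = l1 ++ l2.set i a := by simp

lemma getDL_append_len (l1 l2 : List (List Int)) (i : Nat) :
    (l1 ++ l2).getD (l1.length + i) [] = l2.getD i [] := by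
  simp [List.getD, List.getElem?_append_right]

lemma foldl_set_row (l : List Nat) (g : Nat → Int) (fm : List (List Int)) (p : Nat)
    (hp : p < fm.length) :
    l.foldl (fun fm j => fm.set p ((fm.getD p []).set (j + 4) (g j))) fm
      = fm.set p (l.foldl (fun r j => r.set (j + 4) (g j)) (fm.getD p [])) := by
  induction l generalizing fm with
  | nil =>
      simp only [List.foldl_nil]
      rw [List.getD_eq_getElem _ _ hp, List.set_getElem_self hp]
  | cons j t ih =>
      simp only [List.foldl_cons]
      rw [ih _ (by simpa using hp)]
      simp [List.getD, hp, List.set_set]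

lemma row_build (n : Nat) (g : Nat → Int) (k : Nat) (hk : k ≤ n) :
    (List.range k).foldl (fun r j => r.set (j + 4) (g j)) (List.replicate (n + 8) 0)
      = List.replicate 4 0 ++ (List.range k).map g ++ List.replicate (n - k + 4) 0 := by
  induction k with
  | zero =>
      simp only [List.range_zero, List.foldl_nil, List.map_nil, List.append_nil, Nat.sub_zero]
      rw [show n + 8 = 4 + (n + 4) by omega, List.replicate_add]
  | succ k ih =>
      rw [List.range_succ, List.foldl_append, ih (by omega)]
      simp only [List.foldl_cons, List.foldl_nil]
      rw [show List.replicate (n - k + 4) (0:Int)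
            = 0 :: List.replicate (n - (k+1) + 4) 0 from by
        rw [show n - k + 4 = (n - (k+1) + 4) + 1 by omega, List.replicate_succ]]
      rw [show k + 4 = (List.replicate 4 (0:Int) ++ (List.range k).map g).length + 0 from by simp]
      rw [set_append_len]
      simp [List.append_assoc]

lemma outer_build (matrix : List (List Int)) (m : Nat) (hm : m ≤ matrix.length) :
    (List.range m).foldl (fun fm i =>
        (List.range matrix.length).foldl (fun fm j =>
          fm.set (i + 4) ((fm.getD (i + 4) []).set (j + 4) ((matrix.getD i []).getD j 0))) fm)
      (List.replicate (matrix.length + 8) (List.replicate (matrix.length + 8) (0 : Int)))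
      = List.replicate 4 (List.replicate (matrix.length + 8) 0) ++
          (matrix.take m).map (padRow matrix.length) ++
          List.replicate (matrix.length - m + 4) (List.replicate (matrix.length + 8) 0) := by
  set n := matrix.length with hn
  induction m with
  | zero =>
      simp only [List.range_zero, List.foldl_nil, List.take_zero, List.map_nil, List.append_nil,
        Nat.sub_zero]
      rw [show n + 8 = 4 + (n + 4) by omega, List.replicate_add]
  | succ m ih =>
      rw [List.range_succ, List.foldl_append, ih (by omega)]
      simp only [List.foldl_cons, List.foldl_nil]
      have hlen : (List.replicate 4 (List.replicate (n + 8) (0:Int)) ++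
          (matrix.take m).map (padRow n)).length = m + 4 := by
        simp [List.length_take, hn]; omega
      have hfmlen : (List.replicate 4 (List.replicate (n + 8) (0:Int)) ++
          (matrix.take m).map (padRow n) ++
          List.replicate (n - m + 4) (List.replicate (n + 8) 0)).length = n + 8 := by
        simp [List.length_take, hn]; omega
      rw [foldl_set_row _ _ _ _ (by rw [hfmlen]; omega)]
      -- the row being written is still all zeros
      rw [show List.replicate (n - m + 4) (List.replicate (n+8) (0:Int))
            = List.replicate (n+8) 0 :: List.replicate (n - (m+1) + 4) (List.replicate (n+8) 0) from by
        rw [show n - m + 4 = (n - (m+1) + 4) + 1 by omega, List.replicate_succ]]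
      rw [show m + 4 = (List.replicate 4 (List.replicate (n + 8) (0:Int)) ++
          (matrix.take m).map (padRow n)).length + 0 from by rw [hlen]]
      rw [getDL_append_len, setL_append_len]
      simp only [List.getD_cons_zero, List.set_cons_zero]
      rw [row_build n _ n (le_refl n)]
      have hm' : m < matrix.length := by omega
      have htake : List.take (m+1) matrix = List.take m matrix ++ [matrix[m]] := by
        rw [List.take_add_one]
        simp [List.getElem?_eq_getElem hm']
      have hpad : List.replicate 4 (0:Int) ++ List.map (fun j => (matrix.getD m []).getD j 0) (List.range n) ++ List.replicate (n - n + 4) 0 = padRow n matrix[m] := by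
        simp [padRow, List.getD, List.getElem?_eq_getElem hm']
      have htake2 : List.map (padRow n) (List.take (m+1) matrix)
          = List.map (padRow n) (List.take m matrix) ++ [padRow n matrix[m]] := by
        rw [htake, List.map_append, List.map_singleton]
      rw [hpad, htake2]
      simp [List.append_assoc]

lemma aqz_eq (matrix : List (List Int)) : add_quiet_zone matrix = qz matrix := by
  show (List.range matrix.length).foldl _ _ = _
  rw [outer_build matrix matrix.length (le_refl _)]
  simp [qz, Nat.sub_self]

lemma qz_length (matrix : List (List Int)) : (qz matrix).length = matrix.length + 8 := by
  simp [qz]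

lemma padRow_length (n : Nat) (row : List Int) : (padRow n row).length = n + 8 := by
  simp [padRow]

lemma qz_row_length (matrix : List (List Int)) (R : List Int) (hR : R ∈ qz matrix) :
    R.length = matrix.length + 8 := by
  simp [qz] at hR
  rcases hR with h | ⟨r, _, rfl⟩ | h
  · simp [h]
  · exact padRow_length _ _
  · simp [h]

lemma toDigits_ne_nil (m : Nat) : Nat.toDigits 10 m ≠ [] := by
  rw [Nat.toDigits_eq_if (by norm_num)]
  split <;> simp

lemma toChars_ne_nil (v : Int) : PySem.Int.toChars v ≠ [] := by
  unfold PySem.Int.toChars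
  split
  · simp
  · exact toDigits_ne_nil _

lemma toDigits_singleton (m : Nat) (c : Char) (h : Nat.toDigits 10 m = [c]) : m < 10 ∧ c = m.digitChar := by
  by_cases hm : m < 10
  · rw [Nat.toDigits_of_lt_base hm] at h
    exact ⟨hm, by simpa using h.symm⟩
  · rw [Nat.toDigits_of_base_le (by norm_num) (by omega)] at h
    exfalso
    have := toDigits_ne_nil (m / 10)
    rcases List.exists_cons_of_ne_nil this with ⟨a, t, ht⟩
    rw [ht] at h
    simp at h

lemma toChars_binary_singleton (v : Int) (c : Char) (hc : c = '0' ∨ c = '1')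
    (h : PySem.Int.toChars v = [c]) : (v = 0 ∨ v = 1) ∧ cellChar v = c := by
  unfold PySem.Int.toChars at h
  split at h
  · exfalso
    rcases List.exists_cons_of_ne_nil (toDigits_ne_nil v.natAbs) with ⟨a, t, ht⟩
    rw [ht] at h
    simp at h
  · rename_i hv
    obtain ⟨hm, rfl⟩ := toDigits_singleton _ _ h
    have h0 : (0:Int) ≤ v := by omega
    have hv10 : v < 10 := by omega
    have hvt : v = (v.toNat : Int) := by omega
    have hm' : v.toNat < 10 := by omega
    rcases hc with hc | hc
    · have : v.toNat = 0 := by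
        by_contra hne
        interval_cases h : v.toNat <;> simp_all [Nat.digitChar]
      constructor
      · left; omega
      · have : v = 0 := by omega
        subst this; simp [cellChar]; decide
    · have : v.toNat = 1 := by
        by_contra hne
        interval_cases h : v.toNat <;> simp_all [Nat.digitChar]
      constructor
      · right; omega
      · have : v = 1 := by omega
        subst this; simp [cellChar]; decide

lemma join_nil_eq_flatten (xss : List (List Char)) : PySem.Chars.join [] xss = xss.flatten := by
  induction xss with
  | nil => simp [PySem.Chars.join_nil]
  | cons x t ih =>
      cases t with
      | nil => simp [PySem.Chars.join_singleton]
      | cons y u =>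
          rw [PySem.Chars.join_cons_cons]
          simp only [List.flatten_cons] at *
          rw [ih]
          simp

lemma flatten_toChars_length_ge (w : List Int) :
    w.length ≤ ((w.map PySem.Int.toChars).flatten).length := by
  induction w with
  | nil => simp
  | cons v t ih =>
      simp only [List.map_cons, List.flatten_cons, List.length_append, List.length_cons]
      have := toChars_ne_nil v
      have h1 : 1 ≤ (PySem.Int.toChars v).length := by
        rcases List.exists_cons_of_ne_nil this with ⟨a, s, hs⟩
        simp [hs]
      omega

lemma cellChar_binary (v : Int) (c : Char) (hc : c = '0' ∨ c = '1') (h : cellChar v = c) :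
    (v = 0 ∧ c = '0') ∨ (v = 1 ∧ c = '1') := by
  unfold cellChar at h
  split at h
  · right; rcases hc with rfl | rfl <;> simp_all
  · split at h
    · left; rcases hc with rfl | rfl <;> simp_all
    · exfalso; rcases hc with rfl | rfl <;> simp_all

lemma join_eq_iff (w : List Int) (p : List Char) (hp : ∀ c ∈ p, c = '0' ∨ c = '1')
    (hl : w.length = p.length) :
    ((w.map PySem.Int.toChars).flatten = p) ↔ w.map cellChar = p := by
  induction w generalizing p with
  | nil =>
      cases p with
      | nil => simp
      | cons c q => simp at hl
  | cons v t ih =>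
      cases p with
      | nil => simp at hl
      | cons c q =>
          have hc : c = '0' ∨ c = '1' := hp c (by simp)
          have hq : ∀ c ∈ q, c = '0' ∨ c = '1' := fun d hd => hp d (by simp [hd])
          have hlq : t.length = q.length := by simpa using hl
          constructor
          · intro h
            simp only [List.map_cons, List.flatten_cons] at h
            -- toChars v must be a single char
            have hlen := congrArg List.length h
            simp only [List.length_append, List.length_cons] at hlen
            have hge := flatten_toChars_length_ge t
            have h0 : 1 ≤ (PySem.Int.toChars v).length := by
              rcases List.exists_cons_of_ne_nil (toChars_ne_nil v) with ⟨a, s, hs⟩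
              simp [hs]
            have h1 : (PySem.Int.toChars v).length = 1 := by omega
            rcases List.exists_cons_of_ne_nil (toChars_ne_nil v) with ⟨a, s, hs⟩
            have hs0 : s = [] := by
              rw [hs] at h1; simpa using h1
            subst hs0
            rw [hs] at h
            simp only [List.cons_append, List.nil_append, List.cons.injEq] at h
            obtain ⟨rfl, hrest⟩ := h
            obtain ⟨_, hcell⟩ := toChars_binary_singleton v a hc hs
            simp only [List.map_cons, List.cons.injEq]
            exact ⟨hcell, (ih q hq hlq).mp hrest⟩
          · intro h
            simp only [List.map_cons, List.cons.injEq] at h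
            obtain ⟨hcell, hrest⟩ := h
            rcases cellChar_binary v c hc hcell with ⟨rfl, rfl⟩ | ⟨rfl, rfl⟩ <;>
              simp only [List.map_cons, List.flatten_cons] <;>
              rw [(ih q hq hlq).mpr hrest] <;> rfl

lemma countP_or_disjoint {α : Type} (l : List α) (p q : α → Bool)
    (h : ∀ x ∈ l, ¬(p x = true ∧ q x = true)) :
    l.countP (fun x => p x || q x) = l.countP p + l.countP q := by
  induction l with
  | nil => simp
  | cons x t ih =>
      have hx := h x (by simp)
      have ht : ∀ y ∈ t, ¬(p y = true ∧ q y = true) := fun y hy => h y (by simp [hy])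
      by_cases hpx : p x
      · rcases (show q x = false by rcases hq : q x; rfl; exact absurd ⟨hpx, hq⟩ hx) with hqx
        simp [List.countP_cons, hpx, hqx, ih ht]
        omega
      · by_cases hqx : q x <;> simp [List.countP_cons, hpx, hqx, ih ht] <;> omega

lemma count_overlapping_from_eq (line pat : List Char) (hpat : pat ≠ []) (s : Nat) :
    count_overlapping_from line pat s
      = (List.range line.length).countP (fun j => decide (s ≤ j) && decide (pat <+: line.drop j)) := by
  induction s using count_overlapping_from.induct (line := line) (pat := pat) with
  | case1 s r hr =>
      rw [count_overlapping_from]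
      rw [dif_pos hr]
      symm
      rw [List.countP_eq_zero]
      intro j hj
      simp only [List.mem_range] at hj
      simp only [Bool.and_eq_true, decide_eq_true_eq, not_and]
      intro hsj hpre
      by_cases hs : s ≤ line.length
      · have hno := (PySem.Chars.findFrom_natCast_eq_neg_one_iff line pat s hs).mp hr
        apply hno
        rw [List.infix_iff_prefix_suffix]
        refine ⟨line.drop j, hpre, ?_⟩
        have : line.drop j = (line.drop s).drop (j - s) := by
          rw [List.drop_drop]; congr 1; omega
        rw [this]
        exact List.drop_suffix _ _
      · omega
  | case2 s r hr ih =>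
      rw [count_overlapping_from]
      rw [dif_neg hr]
      rw [ih]
      have hs : s ≤ line.length := (findFrom_ne_bounds line pat s hr).1
      obtain ⟨hge, hpre, hmin⟩ := PySem.Chars.findFrom_natCast_spec line pat s hs hr
      set r0 := (PySem.Chars.findFrom line pat (s:Int)).toNat with hr0
      have hsr : s ≤ r0 := by omega
      have hr0lt : r0 < line.length := by
        have h1 := hpre.length_le
        have h2 : (line.drop r0).length = line.length - r0 := by simp
        rcases List.exists_cons_of_ne_nil hpat with ⟨a, t, ht⟩
        rw [ht] at h1
        simp at h1
        omega
      have hkey : ∀ j ∈ List.range line.length,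
          (decide (s ≤ j) && decide (pat <+: line.drop j))
            = ((j == r0) || (decide (r0 + 1 ≤ j) && decide (pat <+: line.drop j))) := by
        intro j hj
        simp only [List.mem_range] at hj
        rcases Nat.lt_trichotomy j r0 with hlt | rfl | hgt
        · have h2 : ¬(r0 + 1 ≤ j) := by omega
          have hne : j ≠ r0 := by omega
          by_cases hsj : s ≤ j
          · have hnp := hmin j hsj hlt
            simp [hsj, hnp, hne, h2]
          · simp [hsj, hne, h2]
        · simp [hsr, hpre]
        · have h3 : r0 + 1 ≤ j := by omega
          have hsj : s ≤ j := by omega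
          have hne : j ≠ r0 := by omega
          simp [h3, hsj, hne]
      have hcongr : (List.range line.length).countP (fun j => decide (s ≤ j) && decide (pat <+: line.drop j))
          = (List.range line.length).countP (fun j => (j == r0) || (decide (r0+1 ≤ j) && decide (pat <+: line.drop j))) :=
        List.countP_congr (fun x hx => by rw [hkey x hx])
      rw [hcongr]
      rw [countP_or_disjoint _ _ _ (by
        intro x hx
        simp only [beq_iff_eq, Bool.and_eq_true, decide_eq_true_eq]
        rintro ⟨rfl, h1, _⟩
        omega)]
      have : (List.range line.length).countP (fun j => j == r0) = 1 := by
        have h4 : (List.range line.length).countP (fun j => j == r0) = (List.range line.length).count r0 := by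
          simp [List.count]
        rw [h4, List.count_range]
        simp [hr0lt]
      omega

-- window and slice bridges
lemma take_eq_range_map (row : List Int) (n : Nat) (h : n ≤ row.length) :
    row.take n = (List.range n).map (fun j => row.getD j 0) := by
  apply List.ext_getElem
  · simp; omega
  · intro i h1 h2
    simp at h1
    simp [List.getD, List.getElem?_eq_getElem (by omega : i < row.length)]

lemma map_range_window {α : Type} (g : Nat → α) (N a j : Nat) (h : j + a ≤ N) :
    (List.range a).map (fun k => g (j + k)) = (((List.range N).map g).drop j).take a := by
  apply List.ext_getElem
  · simp; omega
  · intro i h1 h2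
    simp at h1
    simp [List.getElem_take, List.getElem_drop, Nat.add_comm j i]

lemma map_eq_range_map {β : Type} (l : List (List Int)) (f : List Int → β) :
    l.map f = (List.range l.length).map (fun i => f (l.getD i [])) := by
  apply List.ext_getElem
  · simp
  · intro i h1 h2
    simp at h1
    simp [List.getD, List.getElem?_eq_getElem h1]

-- a window of Int cells joins to the binary pattern string iff the pattern occurs in the cellChar line
lemma window_join_iff (L : List Int) (p : List Char) (j : Nat)
    (hp : ∀ c ∈ p, c = '0' ∨ c = '1') (hpl : p.length = 11) (hj : j + 11 ≤ L.length) :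
    PySem.Chars.join [] (((L.drop j).take 11).map PySem.Int.toChars) = p
      ↔ p <+: (L.map cellChar).drop j := by
  have hwl : ((L.drop j).take 11).length = 11 := by simp; omega
  rw [join_nil_eq_flatten, join_eq_iff _ _ hp (by omega)]
  rw [List.map_take, List.map_drop]
  constructor
  · intro h
    rw [List.prefix_iff_eq_take, hpl]
    exact h.symm
  · intro h
    rw [List.prefix_iff_eq_take, hpl] at h
    exact h.symm

-- A's horizontal/vertical segment strings
lemma str_join_eq_iff (w : List Int) (p : String) :
    (PySem.Str.join "" (w.map PySem.Int.toStr) = p)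
      ↔ PySem.Chars.join [] (w.map PySem.Int.toChars) = p.toList := by
  constructor
  · intro h
    rw [← h, PySem.Str.toList_join]
    simp [List.map_map, Function.comp_def, PySem.Int.toList_toStr]
  · intro h
    apply String.toList_inj.mp
    rw [PySem.Str.toList_join]
    simpa [List.map_map, Function.comp_def, PySem.Int.toList_toStr] using h

-- sums of 40-indicators are counts
lemma sum_ite_const {α : Type} (l : List α) (p : α → Prop) [DecidablePred p] (c : Int) :
    (l.map (fun x => if p x then c else 0)).sum = c * (l.countP (fun x => decide (p x))) := by
  induction l with
  | nil => simp
  | cons x t ih =>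
      by_cases hx : p x <;> simp [hx, ih, List.countP_cons] <;> ring

-- trim: occurrences only start before length - 10
lemma countP_prefix_trim (cs p : List Char) (hpl : p.length = 11) :
    (List.range cs.length).countP (fun j => decide (p <+: cs.drop j))
      = (List.range (cs.length - 10)).countP (fun j => decide (p <+: cs.drop j)) := by
  by_cases hlen : 11 ≤ cs.length
  · rw [show cs.length = (cs.length - 10) + 10 by omega, List.range_add, List.countP_append]
    have : (List.map (fun i => cs.length - 10 + i) (List.range 10)).countP
        (fun j => decide (p <+: cs.drop j)) = 0 := by
      rw [List.countP_eq_zero]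
      intro j hj
      simp only [List.mem_map, List.mem_range] at hj
      obtain ⟨i, hi, rfl⟩ := hj
      simp only [decide_eq_true_eq]
      intro hpre
      have := hpre.length_le
      simp at this
      omega
    simp [this]
  · rw [show cs.length - 10 = 0 by omega]
    simp only [List.range_zero, List.countP_nil]
    rw [List.countP_eq_zero]
    intro j hj
    simp only [decide_eq_true_eq]
    intro hpre
    have := hpre.length_le
    simp at this
    simp only [List.mem_range] at hj
    omega

def lineCnt (cs : List Char) : Int :=
  (count_overlapping_from cs "10111010000".toList 0 : Int) +
  (count_overlapping_from cs "00001011101".toList 0 : Int)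

def colL (Q : List (List Int)) (j : Nat) : List Int :=
  (List.range Q.length).map (fun r => (Q.getD r []).getD j 0)

lemma p1_toList : "10111010000".toList = ['1','0','1','1','1','0','1','0','0','0','0'] := rfl
lemma p2_toList : "00001011101".toList = ['0','0','0','0','1','0','1','1','1','0','1'] := rfl

lemma p1_binary : ∀ c ∈ "10111010000".toList, c = '0' ∨ c = '1' := by
  rw [p1_toList]
  intro c hc
  simp only [List.mem_cons, List.not_mem_nil, or_false] at hc
  rcases hc with rfl|rfl|rfl|rfl|rfl|rfl|rfl|rfl|rfl|rfl|rfl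
  all_goals simp

lemma p2_binary : ∀ c ∈ "00001011101".toList, c = '0' ∨ c = '1' := by
  rw [p2_toList]
  intro c hc
  simp only [List.mem_cons, List.not_mem_nil, or_false] at hc
  rcases hc with rfl|rfl|rfl|rfl|rfl|rfl|rfl|rfl|rfl|rfl|rfl
  all_goals simp

lemma p1_len : ("10111010000".toList).length = 11 := by rw [p1_toList]; rfl
lemma p2_len : ("00001011101".toList).length = 11 := by rw [p2_toList]; rfl

-- per-line: the 40-indicator sum over all window positions is 40 * (find-loop counts)
lemma seg_sum (L : List Int) :
    ((List.range (L.length - 10)).map (fun j =>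
        if PySem.Str.join "" (((L.drop j).take 11).map PySem.Int.toStr) = "10111010000" then (40:Int) else 0)).sum
      + ((List.range (L.length - 10)).map (fun j =>
        if PySem.Str.join "" (((L.drop j).take 11).map PySem.Int.toStr) = "00001011101" then (40:Int) else 0)).sum
      = 40 * lineCnt (L.map cellChar) := by
  have hgen : ∀ (p : String), (∀ c ∈ p.toList, c = '0' ∨ c = '1') → p.toList.length = 11 →
      ((List.range (L.length - 10)).map (fun j =>
        if PySem.Str.join "" (((L.drop j).take 11).map PySem.Int.toStr) = p then (40:Int) else 0)).sum
      = 40 * (count_overlapping_from (L.map cellChar) p.toList 0 : Int) := by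
    intro p hp hpl
    rw [sum_ite_const]
    congr 1
    have hcong : ∀ j ∈ List.range (L.length - 10),
        (decide (PySem.Str.join "" (((L.drop j).take 11).map PySem.Int.toStr) = p))
          = (decide (p.toList <+: (L.map cellChar).drop j)) := by
      intro j hj
      simp only [List.mem_range] at hj
      have hj11 : j + 11 ≤ L.length := by omega
      simp only [decide_eq_decide]
      rw [str_join_eq_iff, window_join_iff L p.toList j hp hpl hj11]
    rw [List.countP_congr (fun x hx => by rw [hcong x hx])]
    have hne : p.toList ≠ [] := by intro h; rw [h] at hpl; simp at hpl
    rw [count_overlapping_from_eq _ _ hne 0]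
    have htrim := countP_prefix_trim (L.map cellChar) p.toList hpl
    simp only [List.length_map] at htrim ⊢
    rw [← htrim]
    simp
  rw [hgen "10111010000" p1_binary p1_len, hgen "00001011101" p2_binary p2_len]
  unfold lineCnt
  ring

lemma p1_ne_p2 : ("10111010000" : String) ≠ "00001011101" := by
  intro h
  have h2 := congrArg String.toList h
  rw [p1_toList, p2_toList] at h2
  simp at h2

lemma foldl_two_ites {α : Type} (l : List α) (c1 c2 : α → Bool) (pen : Int) :
    l.foldl (fun pen x => if c2 x = true then (if c1 x = true then pen + 40 else pen) + 40
                          else (if c1 x = true then pen + 40 else pen)) pen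
      = pen + (l.map (fun x =>
          (if c1 x = true then (40:Int) else 0) + (if c2 x = true then 40 else 0))).sum := by
  rw [PySem.List.foldl_congr_mem' l _
    (fun pen x => pen + ((if c1 x = true then (40:Int) else 0) + (if c2 x = true then 40 else 0)))
    pen (by intro x hx acc; by_cases h1 : c1 x <;> by_cases h2 : c2 x <;> simp [h1, h2] <;> ring)]
  exact PySem.List.foldl_add l _ pen

-- the combined or-indicator sum over one line
lemma hsum_eq (L : List Int) :
    ((List.range (L.length - 10)).map (fun j =>
        (if (PySem.Str.join "" (((L.drop j).take 11).map PySem.Int.toStr) = "10111010000" ∨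
             PySem.Str.join "" (((L.drop j).take 11).map PySem.Int.toStr) = "00001011101")
         then (40:Int) else 0))).sum
      = 40 * lineCnt (L.map cellChar) := by
  rw [List.map_congr_left (g := fun j =>
      (if PySem.Str.join "" (((L.drop j).take 11).map PySem.Int.toStr) = "10111010000" then (40:Int) else 0)
    + (if PySem.Str.join "" (((L.drop j).take 11).map PySem.Int.toStr) = "00001011101" then (40:Int) else 0))
    (by
      intro j _
      beta_reduce
      by_cases h1 : PySem.Str.join "" (((L.drop j).take 11).map PySem.Int.toStr) = "10111010000" <;>
      by_cases h2 : PySem.Str.join "" (((L.drop j).take 11).map PySem.Int.toStr) = "00001011101"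
      · exact absurd (h1.symm.trans h2) p1_ne_p2
      · rw [if_pos (Or.inl h1), if_pos h1, if_neg h2]; ring
      · rw [if_pos (Or.inr h2), if_neg h1, if_pos h2]; ring
      · rw [if_neg (by tauto), if_neg h1, if_neg h2]; ring)]
  rw [PySem.List.sum_map_add_int]
  exact seg_sum L

lemma contains_iff (s : String) :
    ((["10111010000", "00001011101"] : List String).contains s = true)
      ↔ (s = "10111010000" ∨ s = "00001011101") := by simp

lemma slice11 (R : List Int) (j : Nat) :
    PySem.List.slice R (some (j:Int)) (some ((j:Int) + 11)) = (R.drop j).take 11 := by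
  have h := PySem.List.slice_natCast_add R j 11
  simpa using h

lemma colL_length (Q : List (List Int)) (i : Nat) : (colL Q i).length = Q.length := by
  simp [colL]

lemma a_characterization (matrix : List (List Int)) :
    evaluate_third_penalty matrix
      = 40 * (((List.range (matrix.length + 8)).map
            (fun i => lineCnt (((qz matrix).getD i []).map cellChar))).sum
          + ((List.range (matrix.length + 8)).map
            (fun j => lineCnt ((colL (qz matrix) j).map cellChar))).sum) := by
  unfold evaluate_third_penalty
  dsimp only
  rw [aqz_eq, qz_length]
  rw [PySem.List.foldl_congr_mem' (List.range (matrix.length + 8)) _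
    (fun pen i => pen + ((List.range (matrix.length + 8 - 10)).map (fun (j : Nat) =>
        (if (["10111010000", "00001011101"] : List String).contains
            (PySem.Str.join "" (List.map PySem.Int.toStr
              (PySem.List.slice ((qz matrix).getD i []) (some (j:Int)) (some ((j:Int) + 11))))) = true
         then (40:Int) else 0)
      + (if (["10111010000", "00001011101"] : List String).contains
            (PySem.Str.join "" (List.map (fun (k : Nat) => PySem.Int.toStr
              (((qz matrix).getD (j + k) []).getD i 0)) (List.range 11))) = true
         then (40:Int) else 0))).sum)
    0 (by intro i _ acc; exact foldl_two_ites _ _ _ acc)]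
  rw [PySem.List.foldl_add]
  simp only [zero_add]
  rw [List.map_congr_left (g := fun i =>
      40 * lineCnt (((qz matrix).getD i []).map cellChar)
    + 40 * lineCnt ((colL (qz matrix) i).map cellChar)) ?_]
  · rw [PySem.List.sum_map_add_int, PySem.List.sum_map_const_mul_int,
        PySem.List.sum_map_const_mul_int]
    ring
  intro i hi
  simp only [List.mem_range] at hi
  beta_reduce
  rw [PySem.List.sum_map_add_int]
  have hrowlen : ((qz matrix).getD i []).length = matrix.length + 8 := by
    rw [List.getD_eq_getElem _ _ (by rw [qz_length]; omega)]
    exact qz_row_length matrix _ (List.getElem_mem _)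
  congr 1
  · -- horizontal sum for row i
    have h1 : matrix.length + 8 - 10 = ((qz matrix).getD i []).length - 10 := by rw [hrowlen]
    rw [h1]
    simp only [contains_iff, slice11]
    exact hsum_eq ((qz matrix).getD i [])
  · -- vertical sum for column i
    rw [List.map_congr_left (g := fun j =>
        (if (PySem.Str.join "" ((((colL (qz matrix) i).drop j).take 11).map PySem.Int.toStr) = "10111010000" ∨
             PySem.Str.join "" ((((colL (qz matrix) i).drop j).take 11).map PySem.Int.toStr) = "00001011101")
         then (40:Int) else 0)) ?_]
    · have h2 : matrix.length + 8 - 10 = (colL (qz matrix) i).length - 10 := by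
        rw [colL_length, qz_length]
      rw [h2]
      exact hsum_eq (colL (qz matrix) i)
    intro j hj
    simp only [List.mem_range] at hj
    beta_reduce
    have hj11 : j + 11 ≤ matrix.length + 8 := by omega
    have hv : (List.range 11).map (fun (k : Nat) => PySem.Int.toStr (((qz matrix).getD (j + k) []).getD i 0))
        = (((colL (qz matrix) i).drop j).take 11).map PySem.Int.toStr := by
      have hm : (List.range 11).map (fun (k : Nat) => PySem.Int.toStr (((qz matrix).getD (j + k) []).getD i 0))
          = ((List.range 11).map (fun k => ((qz matrix).getD (j + k : Nat) []).getD i 0)).map PySem.Int.toStr := by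
        rw [List.map_map]; rfl
      rw [hm, map_range_window (fun r => ((qz matrix).getD r []).getD i 0) (matrix.length + 8) 11 j hj11]
      unfold colL
      rw [qz_length]
    rw [hv]
    simp only [contains_iff]

lemma getD_map_in (f : Int → Char) (l : List Int) (j : Nat) (h : j < l.length) (d : Char) :
    (l.map f).getD j d = f (l.getD j 0) := by
  simp [List.getD, List.getElem?_eq_getElem, h]

lemma rows_eq (matrix : List (List Int)) (hpre : Pre_evaluate_third_penalty matrix) :
    List.replicate 4 (List.replicate (matrix.length + 8) '0') ++
      matrix.map (fun row => List.replicate 4 '0' ++ (row.take matrix.length).map cellChar ++ List.replicate 4 '0') ++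
      List.replicate 4 (List.replicate (matrix.length + 8) '0')
    = (qz matrix).map (List.map cellChar) := by
  unfold qz
  rw [List.map_append, List.map_append, List.map_replicate, List.map_replicate, List.map_map]
  simp only [show cellChar 0 = '0' from rfl]
  congr 1
  congr 1
  apply List.map_congr_left
  intro row hrow
  have hlen : matrix.length ≤ row.length := hpre row hrow
  simp only [Function.comp_apply, padRow]
  rw [take_eq_range_map row matrix.length hlen]
  simp only [List.map_append, List.map_replicate]
  rfl

lemma alt_characterization (matrix : List (List Int)) (hpre : Pre_evaluate_third_penalty matrix) :
    evaluate_third_penalty_alt matrix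
      = 40 * (((List.range (matrix.length + 8)).map
            (fun i => lineCnt (((qz matrix).getD i []).map cellChar))).sum
          + ((List.range (matrix.length + 8)).map
            (fun j => lineCnt ((colL (qz matrix) j).map cellChar))).sum) := by
  unfold evaluate_third_penalty_alt
  dsimp only
  rw [rows_eq matrix hpre]
  rw [PySem.List.foldl_congr_mem' _ _ (fun (total : Int) line => total + lineCnt line) 0 (by
    intro line _ acc
    simp only [List.foldl_cons, List.foldl_nil]
    rw [lineCnt]
    ring)]
  rw [PySem.List.foldl_add]
  simp only [zero_add]
  rw [List.map_append, List.sum_append]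
  have hrows : (List.map lineCnt (List.map (List.map cellChar) (qz matrix))).sum
      = ((List.range (matrix.length + 8)).map
          (fun i => lineCnt (List.map cellChar ((qz matrix).getD i [])))).sum := by
    rw [List.map_map]
    rw [show (lineCnt ∘ List.map cellChar) = (fun R => lineCnt (List.map cellChar R)) from rfl]
    rw [map_eq_range_map (qz matrix) (fun R => lineCnt (List.map cellChar R)), qz_length]
  have hcols : (List.map lineCnt
        (List.map (fun j => List.map (fun r => r.getD j '0') (List.map (List.map cellChar) (qz matrix)))
          (List.range (matrix.length + 8)))).sum
      = ((List.range (matrix.length + 8)).map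
          (fun j => lineCnt (List.map cellChar (colL (qz matrix) j)))).sum := by
    rw [List.map_map]
    apply congrArg
    apply List.map_congr_left
    intro j hj
    simp only [List.mem_range] at hj
    simp only [Function.comp_apply]
    apply congrArg
    rw [List.map_map]
    have hcol : ((qz matrix).map ((fun (r : List Char) => r.getD j '0') ∘ List.map cellChar))
        = (qz matrix).map (fun R => cellChar (R.getD j 0)) := by
      apply List.map_congr_left
      intro R hR
      have hRlen : R.length = matrix.length + 8 := qz_row_length matrix R hR
      simp only [Function.comp_apply]
      exact getD_map_in cellChar R j (by omega) '0'
    rw [hcol]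
    rw [map_eq_range_map (qz matrix) (fun R => cellChar (R.getD j 0)), qz_length]
    unfold colL
    rw [qz_length, List.map_map]
    rfl
  rw [hrows, hcols]

-- ===== VERDICT (by name: the statement is the Claim_ definition above) =====
theorem evaluate_third_penalty_spec : Claim_equal_evaluate_third_penalty := by
  intro matrix _ hpre
  unfold Spec_evaluate_third_penalty
  rw [a_characterization, alt_characterization matrix hpre]
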